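-- pv_equiv track=rewrite | github.com/BloomAutist47/bloom-bot | Cogs/_backups/WikiCog copy.py | combine_lst_str
-- ===== SOURCE A (Python) =====
-- def combine_lst_str(list_):
--     res = 0
--     lis_ = []
--     result = []
--     for item in list_:
--         if res >= 900:
--             result.append(lis_)
--             lis_ = []
--             res = 0
--         res += len(item)
--         lis_.append(item)
--     result.append(lis_)
--     return result
-- ===== SOURCE B (Python) =====
-- def combine_lst_str(list_):
--     # Chunk-at-a-time: find each greedy chunk boundary with an inner counting
--     # loop, slice the chunk out, and continue from the boundary.  O(n) total.
--     result, i = [], 0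
--     while True:
--         j, res = i, 0
--         while j < len(list_) and res < 900:
--             res += len(list_[j])
--             j += 1
--         result.append(list_[i:j])
--         if j == len(list_):
--             return result
--         i = j
-- ===== Notes on version B (the rewrite author's own statement) =====
-- stated objective: alternative
-- what changed: Replaces A's single-pass accumulator loop with mutable chunk state by a recursive decomposition: compute the greedy chunk boundary with a counting loop, slice the list there, and recurse on the remainder.
import Mathlib
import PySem

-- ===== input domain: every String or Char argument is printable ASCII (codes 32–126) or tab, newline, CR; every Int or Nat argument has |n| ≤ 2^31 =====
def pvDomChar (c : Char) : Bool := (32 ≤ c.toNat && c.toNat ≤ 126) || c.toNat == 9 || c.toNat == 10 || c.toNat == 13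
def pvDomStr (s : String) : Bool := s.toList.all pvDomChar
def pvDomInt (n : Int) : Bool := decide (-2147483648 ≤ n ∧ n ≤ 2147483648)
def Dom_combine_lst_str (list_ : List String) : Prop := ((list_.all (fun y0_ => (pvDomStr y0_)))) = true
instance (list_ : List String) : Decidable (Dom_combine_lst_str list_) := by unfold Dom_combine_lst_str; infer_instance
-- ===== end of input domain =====

-- B replaces A's single-pass accumulator loop by chunk-at-a-time boundary search plus slicing; same return value.

-- ===== PORT A =====
-- A's for-loop over list_ with state (res, lis_, result), then the final result.append(lis_).
def combineLoopA : List String → Int → List String → List (List String) → List (List String)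
  | [], _res, lis_, result => result ++ [lis_]
  | item :: rest, res, lis_, result =>
    if res ≥ 900 then
      combineLoopA rest (0 + PySem.Str.len item) [item] (result ++ [lis_])
    else
      combineLoopA rest (res + PySem.Str.len item) (lis_ ++ [item]) result

def combine_lst_str (list_ : List String) : List (List String) :=
  combineLoopA list_ 0 [] []

-- ===== PORT B =====
-- Source B's inner loop 'while j < len(list_) and res < 900: res += len(list_[j]); j += 1', returning j.
def innerCount (list_ : List String) (j : Nat) (res : Int) : Nat :=
  if h : j < list_.length ∧ res < 900 then
    innerCount list_ (j + 1) (res + PySem.Str.len list_[j])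
  else j
termination_by list_.length - j

-- Source B's outer 'while True' loop; fuel is a totality guard only (list_.length + 1
-- suffices: each pass strictly advances i, see outerB_fuel below).
def outerB (list_ : List String) : Nat → Nat → List (List String)
  | 0, _i => []
  | fuel + 1, i =>
    let j := innerCount list_ i 0
    let chunk := PySem.List.slice list_ (some (i : Int)) (some (j : Int))  -- list_[i:j]
    if j = list_.length then [chunk] else chunk :: outerB list_ fuel j

def combine_lst_str_alt (list_ : List String) : List (List String) :=
  outerB list_ (list_.length + 1) 0

-- ===== PRECONDITION & SPEC =====
def Spec_combine_lst_str (list_ : List String) (out : List (List String)) : Prop := out = combine_lst_str_alt list_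
instance (list_ : List String) (out : List (List String)) : Decidable (Spec_combine_lst_str list_ out) := by unfold Spec_combine_lst_str; infer_instance

-- ===== CLAIM (what is proved, stated in full; the proofs are below) =====
def Claim_equal_combine_lst_str : Prop := ∀ (list_ : List String), Dom_combine_lst_str list_ → Spec_combine_lst_str list_ (combine_lst_str list_)

-- ===== LEMMAS AND PROOFS =====

-- Proof-only characterisation of the common result: suffix-structural greedy chunking.
def takeChunk : List String → Int → Nat
  | [], _res => 0
  | x :: xs, res => if res < 900 then takeChunk xs (res + PySem.Str.len x) + 1 else 0

theorem takeChunk_pos (x : String) (xs : List String) : 0 < takeChunk (x :: xs) 0 := by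
  simp [takeChunk]

theorem takeChunk_le_length (l : List String) : ∀ res : Int, takeChunk l res ≤ l.length := by
  induction l with
  | nil => intro res; simp [takeChunk]
  | cons x xs ih =>
    intro res
    simp only [takeChunk, List.length_cons]
    split
    · exact Nat.succ_le_succ (ih _)
    · omega

def chunks (l : List String) : List (List String) :=
  let k := takeChunk l 0
  let head := l.take k
  let rest := l.drop k
  head :: (if rest = [] then [] else chunks rest)
termination_by l.length
decreasing_by
  rename_i hrest
  cases l with
  | nil => exact absurd List.drop_nil hrest
  | cons x xs =>
    have hk := takeChunk_pos x xs
    simp only [List.length_drop, List.length_cons]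
    omega

theorem chunks_eq (l : List String) :
    chunks l =
      (l.take (takeChunk l 0)) ::
        (if l.drop (takeChunk l 0) = [] then []
         else chunks (l.drop (takeChunk l 0))) := by
  rw [chunks]

-- A-side: once the current chunk lis_ is nonempty, A's loop from state
-- (res, lis_, result) produces result ++ (lis_ ++ first chunk at res) :: chunks of the rest.
theorem loopA_eq (l : List String) : ∀ (res : Int) (lis_ : List String)
    (result : List (List String)), lis_ ≠ [] →
    combineLoopA l res lis_ result =
      result ++ (lis_ ++ l.take (takeChunk l res)) ::
        (if l.drop (takeChunk l res) = [] then []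
         else chunks (l.drop (takeChunk l res))) := by
  induction l with
  | nil => intro res lis_ result _; simp [combineLoopA, takeChunk]
  | cons x xs ih =>
    intro res lis_ result hne
    by_cases hres : res ≥ 900
    · have hres' : ¬ res < 900 := by omega
      simp only [combineLoopA, if_pos hres, takeChunk, if_neg hres', List.take_zero,
        List.drop_zero, List.append_nil]
      cases xs with
      | nil => simp [combineLoopA, chunks_eq ([x]), takeChunk]
      | cons y ys =>
        rw [ih (0 + PySem.Str.len x) [x] (result ++ [lis_]) (by simp)]
        rw [chunks_eq (x :: y :: ys)]
        simp [takeChunk, List.append_assoc]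
    · have hres' : res < 900 := by omega
      simp only [combineLoopA, if_neg (by omega : ¬ res ≥ 900)]
      rw [ih (res + PySem.Str.len x) (lis_ ++ [x]) result (by simp)]
      simp [takeChunk, if_pos hres', List.append_assoc]

theorem A_eq_chunks (l : List String) : combine_lst_str l = chunks l := by
  unfold combine_lst_str
  cases l with
  | nil => simp [combineLoopA, chunks_eq ([]), takeChunk]
  | cons x xs =>
    simp only [combineLoopA, if_neg (by omega : ¬ (0:Int) ≥ 900)]
    rw [loopA_eq xs (0 + PySem.Str.len x) ([] ++ [x]) [] (by simp)]
    rw [chunks_eq (x :: xs)]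
    simp [takeChunk]

-- B-side: the inner counting loop advances i by exactly the greedy chunk length of the suffix.
theorem innerCount_eq (l : List String) : ∀ (j : Nat) (res : Int),
    innerCount l j res = j + takeChunk (l.drop j) res := by
  intro j
  induction hn : l.length - j generalizing j with
  | zero =>
    intro res
    rw [innerCount]
    have hj : ¬ j < l.length := by omega
    rw [dif_neg (by tauto)]
    rw [List.drop_eq_nil_of_le (by omega)]
    simp [takeChunk]
  | succ n ih =>
    intro res
    have hj : j < l.length := by omega
    have hdrop : l.drop j = l[j] :: l.drop (j + 1) := List.drop_eq_getElem_cons hj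
    rw [innerCount]
    by_cases hres : res < 900
    · rw [dif_pos ⟨hj, hres⟩, ih (j + 1) (by omega), hdrop]
      simp only [takeChunk, if_pos hres]
      omega
    · rw [dif_neg (by tauto), hdrop]
      simp [takeChunk, hres]

-- B-side: with i ≤ len and enough fuel, the outer loop from i yields the chunks of the suffix.
theorem outerB_fuel (l : List String) : ∀ (fuel i : Nat), i ≤ l.length →
    l.length - i + 1 ≤ fuel → outerB l fuel i = chunks (l.drop i) := by
  intro fuel
  induction fuel with
  | zero => intro i _ hf; omega
  | succ fuel ih =>
    intro i hi _
    have hj : innerCount l i 0 = i + takeChunk (l.drop i) 0 := innerCount_eq l i 0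
    have hk : takeChunk (l.drop i) 0 ≤ (l.drop i).length := takeChunk_le_length _ 0
    simp only [List.length_drop] at hk
    simp only [outerB, hj]
    have hslice : PySem.List.slice l (some (i : Int)) (some ((i + takeChunk (l.drop i) 0 : Nat) : Int))
        = (l.drop i).take (takeChunk (l.drop i) 0) := by
      rw [PySem.List.slice_natCast]
      congr 1
      omega
    rw [hslice, chunks_eq (l.drop i)]
    by_cases hend : i + takeChunk (l.drop i) 0 = l.length
    · rw [if_pos hend]
      have : (l.drop i).drop (takeChunk (l.drop i) 0) = [] := by
        rw [List.drop_drop, List.drop_eq_nil_of_le (by omega)]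
      rw [this]
      simp
    · rw [if_neg hend]
      have hlt : i < l.length := by
        by_contra h
        have h0 : l.drop i = [] := List.drop_eq_nil_of_le (by omega)
        rw [h0] at hend
        simp [takeChunk] at hend
        omega
      have hpos : 0 < takeChunk (l.drop i) 0 := by
        have hdrop : l.drop i = l[i] :: l.drop (i + 1) := List.drop_eq_getElem_cons hlt
        rw [hdrop]; exact takeChunk_pos _ _
      have hne : (l.drop i).drop (takeChunk (l.drop i) 0) ≠ [] := by
        rw [List.drop_drop]
        intro h
        have := List.drop_eq_nil_iff.mp h
        omega
      rw [if_neg hne, List.drop_drop]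
      rw [ih (i + takeChunk (l.drop i) 0) (by omega) (by omega)]

-- ===== VERDICT (by name: the statement is the Claim_ definition above) =====
theorem combine_lst_str_spec : Claim_equal_combine_lst_str := by
  unfold Claim_equal_combine_lst_str
  intro l _
  unfold Spec_combine_lst_str combine_lst_str_alt
  rw [outerB_fuel l (l.length + 1) 0 (by omega) (by omega), List.drop_zero, A_eq_chunks]
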